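-- pv_equiv track=rewrite | github.com/MichaelPesce/OGRRE_data_cleaning | src/ogrre_data_cleaning/clean.py | clean_bool
-- ===== SOURCE A (Python) =====
-- def clean_bool(checkbox_str: str):
--     '''
--     check if string is valid representation of boolean
--
--     args:
--         checkbox_str: string of checkbox field
--     returns:
--         boolean: True if the input represents a positive/checked value, False otherwise
--     '''
--     # If input is already a boolean, return it
--     if isinstance(checkbox_str, bool):
--         return checkbox_str
--
--     # If input is None or empty, return False
--     if checkbox_str is None or (isinstance(checkbox_str, str) and not checkbox_str.strip()):
--         return False
--
--     try:
--         # Normalize the string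
--         checkbox_str = checkbox_str.strip().upper()
--
--         # Values that should be interpreted as True
--         true_values = ['X', 'YES', 'TRUE', 'T', 'Y', '1', '\u2611']
--
--         # Evaluate length 1 string
--         if len(checkbox_str) == 1:
--             # Check for True values
--             if checkbox_str in true_values:
--                 return True
--
--             # Check for checkbox symbols
--             if ord(checkbox_str) == 9745:  # Checked box symbol
--                 return True
--             elif ord(checkbox_str) == 9744:  # Unchecked box symbol
--                 return False
--
--         # Evaluate length > 1 strings
--         else:
--             # Check for True values
--             for true_char in true_values:
--                 if true_char in checkbox_str:
--                     return True
--             # Check for checkbox symbols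
--             for box_char in checkbox_str:
--                 if ord(box_char) == 9745:
--                     return True
--
--         # All other values are considered False
--         return False
--     except AttributeError:
--         # If it's not a string and not a boolean, return False
--         return False
-- ===== SOURCE B (Python) =====
-- def clean_bool(checkbox_str: str):
--     # If input is already a boolean, return it
--     if isinstance(checkbox_str, bool):
--         return checkbox_str
--     # None or blank -> False
--     if checkbox_str is None or (isinstance(checkbox_str, str) and not checkbox_str.strip()):
--         return False
--     try:
--         s = checkbox_str.strip().upper()
--     except AttributeError:
--         return False
--     # One unified substring scan replaces A's length-1 / length>1 case split:
--     # for a single character, substring match degenerates to equality with the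
--     # one-char entries, and the checked-box symbol 9745 is '\u2611' itself.
--     return any(tv in s for tv in ['X', 'YES', 'TRUE', 'T', 'Y', '1', '\u2611'])
-- ===== Notes on version B (the rewrite author's own statement) =====
-- stated objective: simpler
-- what changed: Replaced the length-1 vs length>1 case split and its per-character ord() checkbox loop by one uniform any()-substring scan over the same trigger list, which subsumes all of A's branches.
import Mathlib
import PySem

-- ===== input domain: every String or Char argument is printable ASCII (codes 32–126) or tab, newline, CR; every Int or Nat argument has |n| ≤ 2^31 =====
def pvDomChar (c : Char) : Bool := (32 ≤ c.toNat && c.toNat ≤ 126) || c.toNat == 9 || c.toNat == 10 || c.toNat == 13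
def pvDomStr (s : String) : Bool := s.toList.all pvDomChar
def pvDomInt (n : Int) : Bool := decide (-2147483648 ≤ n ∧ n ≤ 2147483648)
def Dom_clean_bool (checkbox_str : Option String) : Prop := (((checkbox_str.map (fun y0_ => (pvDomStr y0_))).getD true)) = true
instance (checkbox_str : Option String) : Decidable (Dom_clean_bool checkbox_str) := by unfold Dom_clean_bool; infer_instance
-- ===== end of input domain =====

-- B replaces A's length-1 / length>1 case split (with its ord() checkbox tests) by one
-- uniform substring scan over the same trigger list; objective: simpler.

-- ===== PORT A =====
def clean_bool (checkbox_str : Option String) : Bool :=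
  match checkbox_str with
  | none => false
  | some s =>
      -- `not checkbox_str.strip()` : blank string → False
      if PySem.Str.strip s = "" then false
      else
        let u := PySem.Str.upper (PySem.Str.strip s)
        let true_values : List String := ["X", "YES", "TRUE", "T", "Y", "1", "\u2611"]
        if PySem.Str.len u = 1 then
          if u ∈ true_values then true
          else
            -- ord(checkbox_str) on the single character; the 9744 branch and the
            -- final fall-through both return False
            match u.toList with
            | c :: _ => if c.toNat = 9745 then true else false
            | [] => false
        else
          -- for-loop returning True on the first matching true_char
          if true_values.any (fun tv => PySem.Str.isIn tv u) then true
          -- for-loop over the characters looking for ord == 9745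
          else if u.toList.any (fun c => c.toNat = 9745) then true
          else false

-- ===== PORT B =====
def clean_bool_alt (checkbox_str : Option String) : Bool :=
  match checkbox_str with
  | none => false
  | some s =>
      if PySem.Str.strip s = "" then false
      else
        let u := PySem.Str.upper (PySem.Str.strip s)
        -- any(tv in u for tv in true_values)
        (["X", "YES", "TRUE", "T", "Y", "1", "\u2611"] : List String).any
          (fun tv => PySem.Str.isIn tv u)

-- ===== PRECONDITION & SPEC =====
def Spec_clean_bool (checkbox_str : Option String) (out : Bool) : Prop := out = clean_bool_alt checkbox_str
instance (checkbox_str : Option String) (out : Bool) : Decidable (Spec_clean_bool checkbox_str out) := by unfold Spec_clean_bool; infer_instance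

-- ===== CLAIM (what is proved, stated in full; the proofs are below) =====
def Claim_equal_clean_bool : Prop := ∀ (checkbox_str : Option String), Dom_clean_bool checkbox_str → Spec_clean_bool checkbox_str (clean_bool checkbox_str)

-- ===== LEMMAS AND PROOFS =====

-- a character with code 9745 is the checked-box symbol itself
lemma char_9745 (c : Char) (h : c.toNat = 9745) : c = '\u2611' := by
  have h2 : ('\u2611').toNat = 9745 := by decide
  exact Char.ext (UInt32.toNat_inj.mp (h.trans h2.symm))

-- a one-character needle is a substring iff its character occurs
lemma isIn_single (a : Char) (L : List Char) : PySem.Chars.isIn [a] L = L.contains a := by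
  by_cases hm : a ∈ L
  · rw [(PySem.Chars.isIn_iff_infix _ _).mpr ((List.singleton_infix_iff a L).mpr hm)]
    simp [hm]
  · rw [(PySem.Chars.isIn_eq_false_iff _ _).mpr (fun hinf => hm ((List.singleton_infix_iff a L).mp hinf))]
    simp [hm]

-- a nonempty needle is a substring of a one-character haystack iff it equals it
lemma isIn_of_single (tv : List Char) (c : Char) (htv : tv ≠ []) :
    PySem.Chars.isIn tv [c] = decide (tv = [c]) := by
  by_cases h : tv = [c]
  · subst h
    rw [(PySem.Chars.isIn_iff_infix _ _).mpr (List.infix_refl _)]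
    simp
  · rw [(PySem.Chars.isIn_eq_false_iff _ _).mpr
      (fun hinf => by rcases (List.infix_singleton_iff _ _).mp hinf with h0 | h1
                      exacts [htv h0, h h1])]
    simp [h]

theorem clean_bool_agree (o : Option String) : clean_bool o = clean_bool_alt o := by
  cases o with
  | none => rfl
  | some s =>
    show (if PySem.Str.strip s = "" then false else _) = (if PySem.Str.strip s = "" then false else _)
    by_cases hs : PySem.Str.strip s = ""
    · simp [hs]
    · simp only [hs, if_false]
      generalize PySem.Str.upper (PySem.Str.strip s) = u
      by_cases h1 : PySem.Str.len u = 1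
      · -- length-1 case: both sides reduce to "u is one of the one-char triggers"
        have hlen : u.toList.length = 1 := by
          have := h1
          simp only [PySem.Str.len] at this
          exact_mod_cast this
        obtain ⟨c, hc⟩ := List.length_eq_one_iff.mp hlen
        simp only [h1, if_true, List.any_cons, List.any_nil, Bool.or_false,
          PySem.Str.isIn_eq, hc]
        rw [show ("X" : String).toList = ['X'] from by simp,
            show ("YES" : String).toList = ['Y','E','S'] from by simp,
            show ("TRUE" : String).toList = ['T','R','U','E'] from by simp,
            show ("T" : String).toList = ['T'] from by simp,
            show ("Y" : String).toList = ['Y'] from by simp,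
            show ("1" : String).toList = ['1'] from by simp,
            show ("\u2611" : String).toList = ['\u2611'] from by simp]
        rw [isIn_of_single _ c (by simp), isIn_of_single _ c (by simp),
            isIn_of_single _ c (by simp), isIn_of_single _ c (by simp),
            isIn_of_single _ c (by simp), isIn_of_single _ c (by simp),
            isIn_of_single _ c (by simp)]
        -- the multi-character triggers can never equal a one-character string
        rw [show (decide (['Y','E','S'] = [c])) = false from by simp,
            show (decide (['T','R','U','E'] = [c])) = false from by simp]
        simp only [Bool.false_or]
        by_cases hm : u ∈ (["X", "YES", "TRUE", "T", "Y", "1", "\u2611"] : List String)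
        · simp only [hm, if_true, Eq.symm hc]
          rcases List.mem_cons.mp hm with h | hm'
          · subst h; simp_all
          rcases List.mem_cons.mp hm' with h | hm''
          · subst h; simp_all
          rcases List.mem_cons.mp hm'' with h | hm3
          · subst h; simp_all
          rcases List.mem_cons.mp hm3 with h | hm4
          · subst h; simp_all
          rcases List.mem_cons.mp hm4 with h | hm5
          · subst h; simp_all
          rcases List.mem_cons.mp hm5 with h | hm6
          · subst h; simp_all
          rcases List.mem_cons.mp hm6 with h | hm7
          · subst h; simp_all
          · exact absurd hm7 (List.not_mem_nil)
        · simp only [hm, if_false]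
          have n1 : u ≠ "X" := fun h => hm (by simp [h])
          have n4 : u ≠ "T" := fun h => hm (by simp [h])
          have n5 : u ≠ "Y" := fun h => hm (by simp [h])
          have n6 : u ≠ "1" := fun h => hm (by simp [h])
          have n7 : u ≠ "\u2611" := fun h => hm (by simp [h])
          have gX : ¬ ('X' = c) := fun h => n1 (String.toList_inj.mp (by simp [hc, ← h]))
          have gT : ¬ ('T' = c) := fun h => n4 (String.toList_inj.mp (by simp [hc, ← h]))
          have gY : ¬ ('Y' = c) := fun h => n5 (String.toList_inj.mp (by simp [hc, ← h]))
          have g1 : ¬ ('1' = c) := fun h => n6 (String.toList_inj.mp (by simp [hc, ← h]))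
          have gB : ¬ ('\u2611' = c) := fun h => n7 (String.toList_inj.mp (by simp [hc, ← h]))
          have hne : c.toNat ≠ 9745 := fun habs =>
            n7 (String.toList_inj.mp (by simp [hc, char_9745 c habs]))
          simp [hne, gX, gT, gY, g1, gB]
      · -- length ≠ 1 case: A's extra 9745-scan is subsumed by the '\u2611' substring test
        simp only [h1, if_false]
        by_cases ha : (["X", "YES", "TRUE", "T", "Y", "1", "\u2611"] : List String).any
            (fun tv => PySem.Str.isIn tv u) = true
        · simp only [ha, if_true]
        · have ha2 : (["X", "YES", "TRUE", "T", "Y", "1", "\u2611"] : List String).any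
              (fun tv => PySem.Str.isIn tv u) = false := Bool.eq_false_iff.mpr ha
          simp only [ha2, Bool.false_eq_true, if_false]
          by_cases hbox : (u.toList.any fun c => decide (c.toNat = 9745)) = true
          · exfalso
            rw [List.any_eq_true] at hbox
            obtain ⟨c, hcmem, hc9745⟩ := hbox
            have hcc : c = '\u2611' := char_9745 c (by simpa using hc9745)
            have hin : PySem.Str.isIn "\u2611" u = true := by
              rw [PySem.Str.isIn_eq, show ("\u2611" : String).toList = ['\u2611'] from by simp,
                isIn_single]
              simp only [List.contains_eq_mem, decide_eq_true_eq]
              exact hcc ▸ hcmem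
            have : (["X", "YES", "TRUE", "T", "Y", "1", "\u2611"] : List String).any
                (fun tv => PySem.Str.isIn tv u) = true :=
              List.any_eq_true.mpr ⟨"\u2611", by simp, hin⟩
            exact ha this
          · simp [hbox]

-- ===== VERDICT (by name: the statement is the Claim_ definition above) =====
theorem clean_bool_spec : Claim_equal_clean_bool := by
  intro o _
  exact clean_bool_agree o
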